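-- pv_equiv track=rewrite | github.com/posl/comment_recommendation | script/mod_gen/4_time/ja/227_B/8.py | func
-- ===== SOURCE A (Python) =====
-- def func(n, s):
--     count = 0
--     for i in range(n):
--         a = 1
--         while True:
--             b = (s[i]-3*a)//(4*a+3)
--             if s[i] == 4*a*b+3*a+3*b and b > 0:
--                 break
--             a += 1
--             if a > s[i]:
--                 count += 1
--                 break
--     return count
-- ===== SOURCE B (Python) =====
-- def func(n, s):
--     # B: an element x is expressible as 4ab+3a+3b (a,b>=1) iff 4x+9 has a
--     # divisor d with 7 <= d, d*d <= 4x+9, d == 3 (mod 4); trial-divide up to sqrt.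
--     def _rep(x):
--         if x < 10:
--             return False
--         m = 4 * x + 9
--         d = 7
--         while d * d <= m:
--             if m % d == 0:
--                 return True
--             d += 4
--         return False
--     return sum(1 for x in s[:max(n, 0)] if not _rep(x))
-- ===== Notes on version B (the rewrite author's own statement) =====
-- stated objective: faster
-- what changed: Instead of scanning a = 1..s[i] per element, B uses the identity 4(4ab+3a+3b)+9 = (4a+3)(4b+3): an element x is expressible iff 4x+9 has a divisor d with 7 <= d, d = 3 (mod 4) and d*d <= 4x+9, so B trial-divides only up to sqrt(4x+9).
import Mathlib
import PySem

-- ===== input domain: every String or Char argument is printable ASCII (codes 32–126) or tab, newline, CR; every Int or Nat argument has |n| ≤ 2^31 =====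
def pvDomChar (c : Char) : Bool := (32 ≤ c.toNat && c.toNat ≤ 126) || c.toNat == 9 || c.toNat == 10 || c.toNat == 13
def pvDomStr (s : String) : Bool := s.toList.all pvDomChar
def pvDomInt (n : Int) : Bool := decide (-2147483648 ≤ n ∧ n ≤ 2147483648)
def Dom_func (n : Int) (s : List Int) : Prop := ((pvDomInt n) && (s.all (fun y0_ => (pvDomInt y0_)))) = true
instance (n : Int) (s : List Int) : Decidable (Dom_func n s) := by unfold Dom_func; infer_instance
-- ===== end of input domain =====

-- B replaces A's per-element scan a = 1..s[i] by trial division of 4*s[i]+9 up to its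
-- square root (4(4ab+3a+3b)+9 = (4a+3)(4b+3)), an asymptotically faster exact algorithm.


-- ===== PORT A =====
-- b = (s[i] - 3*a) // (4*a + 3)  (Python floor division)
def bOf (x a : Int) : Int := PySem.Int.floordiv (x - 3 * a) (4 * a + 3)

-- the inner 'while True' loop of A, acting on 'count'; returns the updated count
def funcWhile (x a count : Int) : Int :=
  if x = 4 * a * bOf x a + 3 * a + 3 * bOf x a ∧ 0 < bOf x a then count
  else if h : x < a + 1 then count + 1
  else funcWhile x (a + 1) count
termination_by (x - a).toNat
decreasing_by omega

def func (n : Int) (s : List Int) : Int :=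
  (PySem.List.pyRange 0 n 1).foldl
    (fun count i => funcWhile (PySem.List.pyGetD s i 0) 1 count) 0

-- ===== PORT B =====
-- the 'while d*d <= m' trial-division loop of B
def divLoop (m d : Int) : Bool :=
  if h : d * d ≤ m then
    (if PySem.Int.mod m d = 0 then true else divLoop m (d + 4))
  else false
termination_by (m + 16 - d).toNat
decreasing_by
  have hdd : d ≤ d * d := by
    rcases (by omega : d ≤ 0 ∨ 1 ≤ d) with h0 | h1
    · exact le_trans h0 (mul_self_nonneg d)
    · nlinarith [mul_nonneg (by omega : (0:Int) ≤ d) (by omega : (0:Int) ≤ d - 1)]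
  omega

-- _rep(x) of Source B
def expB (x : Int) : Bool :=
  if x < 10 then false else divLoop (4 * x + 9) 7

def func_alt (n : Int) (s : List Int) : Int :=
  (PySem.List.slice s none (some (max n 0))).foldl
    (fun c x => c + (if expB x then 0 else 1)) 0

-- ===== PRECONDITION & SPEC =====
-- A indexes s[i] for i in range(n): it raises IndexError exactly when n > len(s).
def Pre_func (n : Int) (s : List Int) : Prop := n ≤ (s.length : Int)
instance (n : Int) (s : List Int) : Decidable (Pre_func n s) := by unfold Pre_func; infer_instance
def pvWitness_func : Int × List Int := (2, [10, 3])

def Spec_func (n : Int) (s : List Int) (out : Int) : Prop := out = func_alt n s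
instance (n : Int) (s : List Int) (out : Int) : Decidable (Spec_func n s out) := by unfold Spec_func; infer_instance

-- ===== CLAIM (what is proved, stated in full; the proofs are below) =====
def Claim_equal_func : Prop := ∀ (n : Int) (s : List Int), Dom_func n s → Pre_func n s → Spec_func n s (func n s)

-- ===== LEMMAS AND PROOFS =====

-- x is expressible as 4ab+3a+3b with b ≥ 1 and a at least a0
def RepAB (a0 x : Int) : Prop := ∃ a b : Int, a0 ≤ a ∧ 1 ≤ b ∧ x = 4 * a * b + 3 * a + 3 * b

theorem cond_of_rep_here (x a : Int) (ha : 1 ≤ a) (b : Int) (hb : 1 ≤ b)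
    (hx : x = 4 * a * b + 3 * a + 3 * b) :
    x = 4 * a * bOf x a + 3 * a + 3 * bOf x a ∧ 0 < bOf x a := by
  have hd : (0:Int) < 4 * a + 3 := by omega
  have hb0 : bOf x a = b := by
    unfold bOf
    rw [PySem.Int.floordiv_eq_iff_of_pos hd]
    constructor <;> nlinarith
  rw [hb0]; exact ⟨hx, by omega⟩

theorem rep_of_cond (x a : Int)
    (h : x = 4 * a * bOf x a + 3 * a + 3 * bOf x a ∧ 0 < bOf x a) : RepAB a x :=
  ⟨a, bOf x a, le_refl a, by omega, h.1⟩

theorem funcWhile_of_rep (x : Int) :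
    ∀ a : Int, 1 ≤ a → RepAB a x → ∀ count, funcWhile x a count = count := by
  refine funcWhile.induct x
    (fun a => 1 ≤ a → RepAB a x → ∀ count, funcWhile x a count = count) ?_ ?_ ?_
  · intro a h _ _ count
    rw [funcWhile, if_pos h]
  · intro a h h2 ha hrep count
    exfalso
    obtain ⟨a', b, haa, hb, hx⟩ := hrep
    nlinarith [mul_nonneg (by omega : (0:Int) ≤ 4 * a') (by omega : (0:Int) ≤ b - 1)]
  · intro a h h2 ih ha hrep count
    rw [funcWhile, if_neg h, dif_neg h2]
    apply ih (by omega) ?_ count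
    obtain ⟨a', b, haa, hb, hx⟩ := hrep
    refine ⟨a', b, ?_, hb, hx⟩
    rcases eq_or_lt_of_le haa with rfl | hlt
    · exact absurd (cond_of_rep_here x a ha b hb hx) h
    · omega

theorem funcWhile_of_norep (x : Int) :
    ∀ a : Int, ¬ RepAB a x → ∀ count, funcWhile x a count = count + 1 := by
  refine funcWhile.induct x
    (fun a => ¬ RepAB a x → ∀ count, funcWhile x a count = count + 1) ?_ ?_ ?_
  · intro a h hno count
    exact absurd (rep_of_cond x a h) hno
  · intro a h h2 _ count
    rw [funcWhile, if_neg h, dif_pos h2]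
  · intro a h h2 ih hno count
    rw [funcWhile, if_neg h, dif_neg h2]
    apply ih ?_ count
    rintro ⟨a', b, haa, hb, hx⟩
    exact hno ⟨a', b, by omega, hb, hx⟩

theorem divLoop_true_iff (m : Int) :
    ∀ d : Int, 7 ≤ d → d % 4 = 3 →
    (divLoop m d = true ↔ ∃ e : Int, d ≤ e ∧ e % 4 = 3 ∧ e * e ≤ m ∧ PySem.Int.mod m e = 0) := by
  refine divLoop.induct m (fun d => 7 ≤ d → d % 4 = 3 →
    (divLoop m d = true ↔ ∃ e : Int, d ≤ e ∧ e % 4 = 3 ∧ e * e ≤ m ∧ PySem.Int.mod m e = 0))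
    ?_ ?_ ?_
  · intro d h hmod hd hd4
    rw [divLoop, dif_pos h, if_pos hmod]
    simp only [true_iff]
    exact ⟨d, le_refl d, hd4, h, hmod⟩
  · intro d h hmod ih hd hd4
    rw [divLoop, dif_pos h, if_neg hmod]
    rw [ih (by omega) (by omega)]
    constructor
    · rintro ⟨e, he, he4, hee, hem⟩; exact ⟨e, by omega, he4, hee, hem⟩
    · rintro ⟨e, he, he4, hee, hem⟩
      refine ⟨e, ?_, he4, hee, hem⟩
      rcases eq_or_lt_of_le he with rfl | hlt
      · exact absurd hem hmod
      · omega
  · intro d h hd hd4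
    rw [divLoop, dif_neg h]
    simp only [Bool.false_eq_true, false_iff]
    rintro ⟨e, he, _, hee, _⟩
    have hsq : d * d ≤ e * e := mul_le_mul he he (by omega) (by omega)
    exact h (le_trans hsq hee)

theorem expB_true_iff (x : Int) : expB x = true ↔ RepAB 1 x := by
  unfold expB
  split_ifs with hx
  · simp only [false_iff]
    rintro ⟨a, b, ha, hb, hrep⟩
    nlinarith [mul_nonneg (by omega : (0:Int) ≤ a - 1) (by omega : (0:Int) ≤ b - 1)]
  · rw [divLoop_true_iff (4 * x + 9) 7 (by omega) (by omega)]
    constructor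
    · rintro ⟨e, he, he4, hee, hem⟩
      rw [PySem.Int.mod_eq_zero_iff_dvd] at hem
      obtain ⟨f, hf⟩ := hem
      have hef : e ≤ f := by
        have h1 : e * e ≤ e * f := by rw [← hf]; exact hee
        exact le_of_mul_le_mul_left h1 (by omega)
      obtain ⟨p, hp⟩ : ∃ p, e = 4 * p + 3 := ⟨(e - 3) / 4, by omega⟩
      obtain ⟨q, r, hq, hr0, hr4⟩ : ∃ q r, f = 4 * q + r ∧ 0 ≤ r ∧ r < 4 :=
        ⟨f / 4, f % 4, by omega, by omega, by omega⟩
      obtain ⟨K, hK⟩ : ∃ K, e * f = 4 * K + 3 * r :=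
        ⟨4 * p * q + p * r + 3 * q, by rw [hp, hq]; ring⟩
      have hM : 4 * x + 9 = 4 * K + 3 * r := by rw [hf, hK]
      have hr3 : r = 3 := by omega
      subst hr3
      have h9 : 4 * x + 9 = 16 * (p * q) + 12 * p + 12 * q + 9 := by rw [hf, hp, hq]; ring
      exact ⟨p, q, by omega, by omega, by linarith [h9]⟩
    · rintro ⟨a, b, ha, hb, hrep⟩
      rcases le_total a b with hab | hab
      · refine ⟨4 * a + 3, by omega, by omega, ?_, ?_⟩
        · nlinarith [mul_le_mul_of_nonneg_left (by omega : 4 * a + 3 ≤ 4 * b + 3)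
            (by omega : (0:Int) ≤ 4 * a + 3)]
        · rw [PySem.Int.mod_eq_zero_iff_dvd]
          exact ⟨4 * b + 3, by rw [hrep]; ring⟩
      · refine ⟨4 * b + 3, by omega, by omega, ?_, ?_⟩
        · nlinarith [mul_le_mul_of_nonneg_left (by omega : 4 * b + 3 ≤ 4 * a + 3)
            (by omega : (0:Int) ≤ 4 * b + 3)]
        · rw [PySem.Int.mod_eq_zero_iff_dvd]
          exact ⟨4 * a + 3, by rw [hrep]; ring⟩

theorem funcWhile_step (x c : Int) : funcWhile x 1 c = c + (if expB x then 0 else 1) := by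
  cases hE : expB x
  · rw [if_neg (by simp), funcWhile_of_norep x 1
      (fun h => by rw [(expB_true_iff x).2 h] at hE; exact Bool.noConfusion hE) c]
  · rw [if_pos rfl, add_zero, funcWhile_of_rep x 1 (le_refl 1) ((expB_true_iff x).1 hE) c]

theorem foldl_range_take (f : Int → Int → Int) (s : List Int) :
    ∀ (m : Nat) (init : Int), m ≤ s.length →
    (PySem.List.pyRange 0 (m : Int) 1).foldl (fun c i => f c (PySem.List.pyGetD s i 0)) init
      = (s.take m).foldl f init := by
  intro m
  induction m with
  | zero => intro init _; simp
  | succ k ih =>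
    intro init hm
    have hk : k < s.length := by omega
    have hsplit : PySem.List.pyRange 0 ((k + 1 : Nat) : Int) 1
        = PySem.List.pyRange 0 ((k : Nat) : Int) 1 ++ [(k : Int)] := by
      rw [PySem.List.pyRange_one, PySem.List.pyRange_one]
      rw [show (((k + 1 : Nat) : Int) - 0).toNat = k + 1 by omega,
        show (((k : Nat) : Int) - 0).toNat = k by omega]
      rw [List.range_succ]
      simp
    have htake : s.take (k + 1) = s.take k ++ [s[k]] := by
      rw [List.take_add_one]; simp [List.getElem?_eq_getElem hk]
    rw [hsplit, htake, List.foldl_append, List.foldl_append, ih init (by omega)]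
    simp [PySem.List.pyGetD_natCast, List.getD_eq_getElem?_getD, List.getElem?_eq_getElem hk]

-- ===== VERDICT (by name: the statement is the Claim_ definition above) =====
theorem func_spec : Claim_equal_func := by
  intro n s _ hpre
  unfold Spec_func func func_alt
  have hmax : (0:Int) ≤ max n 0 := le_max_right n 0
  rw [PySem.List.slice_to s hmax]
  have hrange : PySem.List.pyRange 0 n 1 = PySem.List.pyRange 0 (n.toNat : Int) 1 := by
    rw [PySem.List.pyRange_one, PySem.List.pyRange_one]
    rw [show (n - 0).toNat = n.toNat by omega, show ((n.toNat : Int) - 0).toNat = n.toNat by omega]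
  have htn : (max n 0).toNat = n.toNat := by omega
  rw [hrange, htn,
    foldl_range_take (fun c x => funcWhile x 1 c) s n.toNat 0 (by unfold Pre_func at hpre; omega)]
  apply PySem.List.foldl_congr_mem
  intro acc x _
  exact funcWhile_step x acc
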